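-- pv_equiv track=rewrite | github.com/nasa/opera-sds-pcm | data_subscriber/rtc/mgrs_bursts_collection_db_client.py | reduce_bursts_to_cmr_patterns
-- ===== SOURCE A (Python) =====
-- from collections import defaultdict
--
-- def tree():
--     """
--     Simple implementation of a tree data structure in python. Essentially a defaultdict of default dicts.
--
--     Usage: foo = tree() ; foo["a"]["b"]["c"]... = bar
--     """
--     return defaultdict(tree)
--
-- def dicts(t):
--     """Utility function for casting a tree to a complex dict"""
--     return {k: dicts(t[k]) for k in t}
--
-- def reduce_bursts_to_cmr_patterns(rtc_native_id_patterns_burst_sets):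
--     native_id_pattern_tree = tree()
--     for pattern in rtc_native_id_patterns_burst_sets:
--         native_id_pattern_tree[pattern[:-7]][pattern[:-6]][pattern[:-5]][pattern[:-4]][pattern]
--     native_id_pattern_tree = dicts(native_id_pattern_tree)
--     rtc_native_id_patterns = set()
--     for k1, v1 in native_id_pattern_tree.items():
--         if len(v1.keys()) == 10:
--             rtc_native_id_patterns.add(k1)
--         else:
--             for k2, v2 in v1.items():
--                 if len(v2.keys()) == 10:
--                     rtc_native_id_patterns.add(k2)
--                 else:
--                     for k3, v3 in v2.items():
--                         if len(v3.keys()) == 10: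
--                             rtc_native_id_patterns.add(k3)
--                         else:
--                             for k4, v4 in v3.items():
--                                 if len(v4.keys()) == 3:  # got to the list of full native-ids
--                                     rtc_native_id_patterns.add(k4)
--                                 else:
--                                     rtc_native_id_patterns.update(set(v4.keys()))  # all the individual beams (1/3 or 2/3)
--     rtc_native_id_patterns = {p + "*" for p in rtc_native_id_patterns}
--
--     return rtc_native_id_patterns
-- ===== SOURCE B (Python) =====
-- def reduce_bursts_to_cmr_patterns(rtc_native_id_patterns_burst_sets):
--     children1, children2, children3, children4 = {}, {}, {}, {}
--     for p in rtc_native_id_patterns_burst_sets: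
--         children1.setdefault(p[:-7], set()).add(p[:-6])
--         children2.setdefault(p[:-6], set()).add(p[:-5])
--         children3.setdefault(p[:-5], set()).add(p[:-4])
--         children4.setdefault(p[:-4], set()).add(p)
--     prefixes = set()
--     for p in rtc_native_id_patterns_burst_sets:
--         if len(children1[p[:-7]]) == 10:
--             prefixes.add(p[:-7])
--         elif len(children2[p[:-6]]) == 10:
--             prefixes.add(p[:-6])
--         elif len(children3[p[:-5]]) == 10:
--             prefixes.add(p[:-5])
--         elif len(children4[p[:-4]]) == 3:
--             prefixes.add(p[:-4])
--         else:
--             prefixes.add(p)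
--     return {q + "*" for q in prefixes}
-- ===== Notes on version B (the rewrite author's own statement) =====
-- stated objective: simpler
-- what changed: Replaces the five-level defaultdict tree, the recursive dicts() deep copy and the four nested traversal loops by four flat prefix-to-children dicts built in one pass plus a single per-pattern classification pass.
import Mathlib
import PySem

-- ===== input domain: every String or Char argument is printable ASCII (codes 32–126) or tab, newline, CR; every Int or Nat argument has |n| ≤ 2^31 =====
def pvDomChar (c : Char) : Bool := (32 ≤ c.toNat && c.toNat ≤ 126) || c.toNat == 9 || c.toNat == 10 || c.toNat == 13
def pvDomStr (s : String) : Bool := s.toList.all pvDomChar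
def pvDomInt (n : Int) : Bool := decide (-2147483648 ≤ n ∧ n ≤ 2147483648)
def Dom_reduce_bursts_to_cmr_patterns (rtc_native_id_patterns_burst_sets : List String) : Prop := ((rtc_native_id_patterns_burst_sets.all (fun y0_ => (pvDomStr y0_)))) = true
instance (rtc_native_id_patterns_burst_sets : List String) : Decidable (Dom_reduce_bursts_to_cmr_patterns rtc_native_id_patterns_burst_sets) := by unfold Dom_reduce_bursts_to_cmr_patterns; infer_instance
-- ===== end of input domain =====

-- B replaces A's five-level defaultdict tree + deep copy + nested traversal by four flat
-- prefix→children dicts built in one pass and a single per-pattern classification pass.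
-- Both Pythons return a SET of strings; a Python set's iteration order is not modelled, so
-- both ports return the canonical (sorted) list of the set's distinct elements.

-- ===== PORT A =====
-- fixed-depth tree of nested dicts: tree[p[:-7]][p[:-6]][p[:-5]][p[:-4]][p]
-- (the leaf subtree created by the innermost access is never inspected: modelled as Unit)
abbrev pvT5 := PySem.Dict String Unit
abbrev pvT4 := PySem.Dict String pvT5
abbrev pvT3 := PySem.Dict String pvT4
abbrev pvT2 := PySem.Dict String pvT3
abbrev pvT1 := PySem.Dict String pvT2

-- each defaultdict access reads the existing subtree (empty if absent) and writes it back;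
-- Dict.insert keeps the position of existing keys and appends new ones, like Python's dict
def pvUpd5 (t : pvT5) (p : String) : pvT5 := t.insert p ()
def pvUpd4 (t : pvT4) (p : String) : pvT4 :=
  t.insert (PySem.Str.slice p none (some (-4))) (pvUpd5 (t.getD (PySem.Str.slice p none (some (-4))) PySem.Dict.empty) p)
def pvUpd3 (t : pvT3) (p : String) : pvT3 :=
  t.insert (PySem.Str.slice p none (some (-5))) (pvUpd4 (t.getD (PySem.Str.slice p none (some (-5))) PySem.Dict.empty) p)
def pvUpd2 (t : pvT2) (p : String) : pvT2 :=
  t.insert (PySem.Str.slice p none (some (-6))) (pvUpd3 (t.getD (PySem.Str.slice p none (some (-6))) PySem.Dict.empty) p)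
def pvTreeInsert (d : pvT1) (p : String) : pvT1 :=
  d.insert (PySem.Str.slice p none (some (-7))) (pvUpd2 (d.getD (PySem.Str.slice p none (some (-7))) PySem.Dict.empty) p)

-- dicts(t) = {k: dicts(t[k]) for k in t} : a level-by-level copy of the tree
def pvDicts5 (t : pvT5) : pvT5 := PySem.Dict.ofList (t.items.map (fun kv => (kv.1, kv.2)))
def pvDicts4 (t : pvT4) : pvT4 := PySem.Dict.ofList (t.items.map (fun kv => (kv.1, pvDicts5 kv.2)))
def pvDicts3 (t : pvT3) : pvT3 := PySem.Dict.ofList (t.items.map (fun kv => (kv.1, pvDicts4 kv.2)))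
def pvDicts2 (t : pvT2) : pvT2 := PySem.Dict.ofList (t.items.map (fun kv => (kv.1, pvDicts3 kv.2)))
def pvDicts1 (t : pvT1) : pvT1 := PySem.Dict.ofList (t.items.map (fun kv => (kv.1, pvDicts2 kv.2)))

-- the nested 'for k, v in ….items(): if len(v.keys()) == …' traversal collecting the set
def pvCollect (t1 : pvT1) : PySem.Set String :=
  t1.items.foldl (fun s kv1 =>
    if kv1.2.keys.length == 10 then s.add kv1.1
    else kv1.2.items.foldl (fun s kv2 =>
      if kv2.2.keys.length == 10 then s.add kv2.1
      else kv2.2.items.foldl (fun s kv3 =>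
        if kv3.2.keys.length == 10 then s.add kv3.1
        else kv3.2.items.foldl (fun s kv4 =>
          if kv4.2.keys.length == 3 then s.add kv4.1
          else s.update kv4.2.keys) s) s) s) PySem.Set.empty

def reduce_bursts_to_cmr_patterns (rtc_native_id_patterns_burst_sets : List String) : List String :=
  let tree := pvDicts1 (rtc_native_id_patterns_burst_sets.foldl pvTreeInsert PySem.Dict.empty)
  let pats := pvCollect tree
  -- {p + "*" for p in pats} : the set's iteration order is not modelled; canonical sorted order
  (PySem.List.sorted pats (fun q => q) false).map (fun q => q ++ "*")

-- ===== PORT B =====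
-- children dicts: prefix → set of its distinct next-level extensions among the input
def pvChild (cut next : Int) (xs : List String) : PySem.Dict String (PySem.Set String) :=
  xs.foldl (fun d p =>
    d.modify (PySem.Str.slice p none (some cut)) PySem.Set.empty
      (fun s => s.add (PySem.Str.slice p none (some next)))) PySem.Dict.empty

def reduce_bursts_to_cmr_patterns_alt (rtc_native_id_patterns_burst_sets : List String) : List String :=
  let xs := rtc_native_id_patterns_burst_sets
  let c1 := pvChild (-7) (-6) xs
  let c2 := pvChild (-6) (-5) xs
  let c3 := pvChild (-5) (-4) xs
  let c4 := xs.foldl (fun d p =>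
    d.modify (PySem.Str.slice p none (some (-4))) PySem.Set.empty (fun s => s.add p)) PySem.Dict.empty
  -- the key is always present (it was inserted from the same pattern list): getD is c1[...]
  let prefixes := xs.foldl (fun s p =>
    if (c1.getD (PySem.Str.slice p none (some (-7))) PySem.Set.empty).length == 10 then
      s.add (PySem.Str.slice p none (some (-7)))
    else if (c2.getD (PySem.Str.slice p none (some (-6))) PySem.Set.empty).length == 10 then
      s.add (PySem.Str.slice p none (some (-6)))
    else if (c3.getD (PySem.Str.slice p none (some (-5))) PySem.Set.empty).length == 10 then
      s.add (PySem.Str.slice p none (some (-5)))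
    else if (c4.getD (PySem.Str.slice p none (some (-4))) PySem.Set.empty).length == 3 then
      s.add (PySem.Str.slice p none (some (-4)))
    else s.add p) PySem.Set.empty
  -- {q + "*" for q in prefixes} : canonical sorted order, as in port A
  (PySem.List.sorted prefixes (fun q => q) false).map (fun q => q ++ "*")

-- ===== PRECONDITION & SPEC =====
def Spec_reduce_bursts_to_cmr_patterns (rtc_native_id_patterns_burst_sets : List String) (out : List String) : Prop := out = reduce_bursts_to_cmr_patterns_alt rtc_native_id_patterns_burst_sets
instance (rtc_native_id_patterns_burst_sets : List String) (out : List String) : Decidable (Spec_reduce_bursts_to_cmr_patterns rtc_native_id_patterns_burst_sets out) := by unfold Spec_reduce_bursts_to_cmr_patterns; infer_instance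

-- ===== CLAIM (what is proved, stated in full; the proofs are below) =====
def Claim_equal_reduce_bursts_to_cmr_patterns : Prop := ∀ (rtc_native_id_patterns_burst_sets : List String), Dom_reduce_bursts_to_cmr_patterns rtc_native_id_patterns_burst_sets → Spec_reduce_bursts_to_cmr_patterns rtc_native_id_patterns_burst_sets (reduce_bursts_to_cmr_patterns rtc_native_id_patterns_burst_sets)

-- ===== LEMMAS AND PROOFS =====

-- proof-side view of the slices: p[:-k] = the first (len - k) characters
def pvG (k : Nat) (s : String) : String := String.ofList (s.toList.take (s.toList.length - k))
-- the patterns whose [:-k] prefix is c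
def pvF (k : Nat) (xs : List String) (c : String) : List String := xs.filter (fun p => pvG k p == c)
-- number of distinct [:-j] prefixes among the patterns whose [:-k] prefix is c
def pvN (k j : Nat) (xs : List String) (c : String) : Nat :=
  (PySem.Set.ofList ((pvF k xs c).map (pvG j))).length

-- the prefix both programs emit for pattern x (A via the tree, B via the flat dicts)
def pvCls4 (xs : List String) (x : String) : String :=
  if (PySem.Set.ofList (pvF 4 xs (pvG 4 x))).length = 3 then pvG 4 x else x
def pvCls3 (xs : List String) (x : String) : String :=
  if pvN 5 4 xs (pvG 5 x) = 10 then pvG 5 x else pvCls4 xs x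
def pvCls2 (xs : List String) (x : String) : String :=
  if pvN 6 5 xs (pvG 6 x) = 10 then pvG 6 x else pvCls3 xs x
def pvCls1 (xs : List String) (x : String) : String :=
  if pvN 7 6 xs (pvG 7 x) = 10 then pvG 7 x else pvCls2 xs x

lemma pvSlice_eq (p : String) (k : Nat) (h : 1 < k) :
    PySem.Str.slice p none (some (-(OfNat.ofNat k))) = pvG k p := by
  show String.ofList (PySem.Chars.slice p.toList none (some (-(OfNat.ofNat k)))) = _
  show String.ofList (PySem.List.slice p.toList none (some (-(OfNat.ofNat k)))) = _
  rw [PySem.List.slice_to_neg_ofNat _ k h]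
  rfl

lemma pvSlice7 (p : String) : PySem.Str.slice p none (some (-7)) = pvG 7 p := pvSlice_eq p 7 (by omega)
lemma pvSlice6 (p : String) : PySem.Str.slice p none (some (-6)) = pvG 6 p := pvSlice_eq p 6 (by omega)
lemma pvSlice5 (p : String) : PySem.Str.slice p none (some (-5)) = pvG 5 p := pvSlice_eq p 5 (by omega)
lemma pvSlice4 (p : String) : PySem.Str.slice p none (some (-4)) = pvG 4 p := pvSlice_eq p 4 (by omega)

lemma pvG_succ (k : Nat) (s : String) : pvG (k + 1) s = pvG 1 (pvG k s) := by
  unfold pvG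
  rw [String.toList_ofList, List.length_take, List.take_take]
  have h : min (min (s.toList.length - k) s.toList.length - 1) (s.toList.length - k)
      = s.toList.length - (k + 1) := by omega
  rw [h]

-- a deeper prefix determines the shallower one
lemma pvG_mono {k : Nat} {p q : String} (h : pvG k p = pvG k q) : pvG (k + 1) p = pvG (k + 1) q := by
  rw [pvG_succ k p, pvG_succ k q, h]

-- filtering on a deep prefix inside a shallow-prefix group is filtering on the deep prefix alone
lemma pvFilter_flatten (j : Nat) (xs : List String) (k k' x1 : String)
    (h1 : pvG (j + 1) x1 = k) (h2 : pvG j x1 = k') :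
    (pvF (j + 1) xs k).filter (fun p => pvG j p == k') = pvF j xs k' := by
  unfold pvF
  rw [List.filter_filter]
  apply List.filter_congr
  intro a _
  by_cases hj : pvG j a = k'
  · have : pvG (j + 1) a = k := by
      rw [← h1]; exact pvG_mono (by rw [hj, ← h2])
    simp [hj, this]
  · simp [hj]

-- generic lookup through a grouping loop: d[key(x)] = f(d.get(key(x), init), x)
lemma pvGetD_foldl {ν : Type} (kf : String → String) (u : ν → String → ν) (init : ν)
    (l : List String) (d : PySem.Dict String ν) (k : String) :
    (l.foldl (fun d x => d.insert (kf x) (u (d.getD (kf x) init) x)) d).getD k init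
      = (l.filter (fun x => kf x == k)).foldl u (d.getD k init) := by
  induction l generalizing d with
  | nil => rfl
  | cons x t ih =>
    rw [List.foldl_cons, List.filter_cons, ih]
    by_cases h : kf x = k
    · simp only [h, beq_self_eq_true, if_pos, List.foldl_cons,
        PySem.Dict.getD_insert_self]
    · have hb : (kf x == k) = false := by simp [h]
      rw [hb, if_neg (by simp), PySem.Dict.getD_insert_of_ne _ _ _ (Ne.symm h)]

lemma pvKeys_foldl {ν : Type} (kf : String → String) (u : ν → String → ν) (init : ν)
    (l : List String) :
    (l.foldl (fun d x => d.insert (kf x) (u (d.getD (kf x) init) x)) PySem.Dict.empty).keys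
      = PySem.Set.ofList (l.map kf) := by
  rw [PySem.Dict.keys_foldl_insert_key l kf (fun d x => u (d.getD (kf x) init) x) PySem.Dict.empty]
  rw [PySem.Dict.keys_empty, PySem.Set.update_nil_left]

lemma pvNodupKeys_foldl {ν : Type} (kf : String → String) (u : ν → String → ν) (init : ν)
    (l : List String) :
    (l.foldl (fun d x => d.insert (kf x) (u (d.getD (kf x) init) x)) PySem.Dict.empty).keys.Nodup := by
  exact PySem.Dict.nodup_keys_foldl_insert_key l kf _ PySem.Dict.empty (by rw [PySem.Dict.keys_empty]; exact List.nodup_nil)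

-- the tree levels as standalone builders
def pvB5 (ys : List String) : pvT5 := ys.foldl pvUpd5 PySem.Dict.empty
def pvB4 (ys : List String) : pvT4 := ys.foldl pvUpd4 PySem.Dict.empty
def pvB3 (ys : List String) : pvT3 := ys.foldl pvUpd3 PySem.Dict.empty
def pvB2 (ys : List String) : pvT2 := ys.foldl pvUpd2 PySem.Dict.empty
def pvB1 (ys : List String) : pvT1 := ys.foldl pvTreeInsert PySem.Dict.empty

lemma pvItems_foldl {ν : Type} (kf : String → String) (u : PySem.Dict String ν → String → PySem.Dict String ν)
    (l : List String) :
    (l.foldl (fun d x => d.insert (kf x) (u (d.getD (kf x) PySem.Dict.empty) x)) PySem.Dict.empty).items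
      = (PySem.Set.ofList (l.map kf)).map
          (fun c => (c, (l.filter (fun x => kf x == c)).foldl u PySem.Dict.empty)) := by
  rw [PySem.Dict.items_eq_map_keys _ (pvNodupKeys_foldl kf u PySem.Dict.empty l) PySem.Dict.empty]
  rw [pvKeys_foldl kf u PySem.Dict.empty l]
  apply List.map_congr_left
  intro c _
  rw [pvGetD_foldl kf u PySem.Dict.empty l PySem.Dict.empty c, PySem.Dict.getD_empty]

lemma pvKeys_B5 (ys : List String) : (pvB5 ys).keys = PySem.Set.ofList ys := by
  show (ys.foldl (fun t p => t.insert p ((fun (_ : pvT5) (_ : String) => ()) t p)) PySem.Dict.empty).keys = _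
  rw [PySem.Dict.keys_foldl_insert, PySem.Dict.keys_empty, PySem.Set.update_nil_left]

lemma pvItems_B4 (ys : List String) :
    (pvB4 ys).items = (PySem.Set.ofList (ys.map (pvG 4))).map
      (fun c => (c, pvB5 (ys.filter (fun p => pvG 4 p == c)))) := by
  refine Eq.trans (pvItems_foldl (fun p => PySem.Str.slice p none (some (-4))) pvUpd5 ys) ?_
  simp only [pvSlice4]
  rfl

lemma pvItems_B3 (ys : List String) :
    (pvB3 ys).items = (PySem.Set.ofList (ys.map (pvG 5))).map
      (fun c => (c, pvB4 (ys.filter (fun p => pvG 5 p == c)))) := by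
  refine Eq.trans (pvItems_foldl (fun p => PySem.Str.slice p none (some (-5))) pvUpd4 ys) ?_
  simp only [pvSlice5]
  rfl

lemma pvItems_B2 (ys : List String) :
    (pvB2 ys).items = (PySem.Set.ofList (ys.map (pvG 6))).map
      (fun c => (c, pvB3 (ys.filter (fun p => pvG 6 p == c)))) := by
  refine Eq.trans (pvItems_foldl (fun p => PySem.Str.slice p none (some (-6))) pvUpd3 ys) ?_
  simp only [pvSlice6]
  rfl

lemma pvItems_B1 (ys : List String) :
    (pvB1 ys).items = (PySem.Set.ofList (ys.map (pvG 7))).map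
      (fun c => (c, pvB2 (ys.filter (fun p => pvG 7 p == c)))) := by
  refine Eq.trans (pvItems_foldl (fun p => PySem.Str.slice p none (some (-7))) pvUpd2 ys) ?_
  simp only [pvSlice7]
  rfl

lemma pvKeys_B4 (ys : List String) : (pvB4 ys).keys = PySem.Set.ofList (ys.map (pvG 4)) := by
  refine Eq.trans (pvKeys_foldl (fun p => PySem.Str.slice p none (some (-4))) pvUpd5 PySem.Dict.empty ys) ?_
  simp only [pvSlice4]
lemma pvKeys_B3 (ys : List String) : (pvB3 ys).keys = PySem.Set.ofList (ys.map (pvG 5)) := by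
  refine Eq.trans (pvKeys_foldl (fun p => PySem.Str.slice p none (some (-5))) pvUpd4 PySem.Dict.empty ys) ?_
  simp only [pvSlice5]
lemma pvKeys_B2 (ys : List String) : (pvB2 ys).keys = PySem.Set.ofList (ys.map (pvG 6)) := by
  refine Eq.trans (pvKeys_foldl (fun p => PySem.Str.slice p none (some (-6))) pvUpd3 PySem.Dict.empty ys) ?_
  simp only [pvSlice6]

-- the dict comprehension {k: f(t[k]) for k in t} over a dict with distinct keys
lemma pvOfListMap {ν : Type} (t : PySem.Dict String ν) (f : ν → ν) (h : t.keys.Nodup) :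
    (PySem.Dict.ofList (t.items.map (fun kv => (kv.1, f kv.2)))).items
      = t.items.map (fun kv => (kv.1, f kv.2)) := by
  show (List.foldl (fun d (a : String × ν) => d.insert a.1 a.2) PySem.Dict.empty _).items = _
  rw [PySem.Dict.items_foldl_insert_fresh _ Prod.fst Prod.snd PySem.Dict.empty
    (by intro a _; rfl) (by simpa [List.map_map, Function.comp] using h)]
  simp [PySem.Dict.empty]

lemma pvNodupKeys_B5 (ys : List String) : (pvB5 ys).keys.Nodup := by
  rw [pvKeys_B5]; exact PySem.Set.nodup_ofList ys
lemma pvNodupKeys_B4 (ys : List String) : (pvB4 ys).keys.Nodup :=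
  pvNodupKeys_foldl _ pvUpd5 PySem.Dict.empty ys
lemma pvNodupKeys_B3 (ys : List String) : (pvB3 ys).keys.Nodup :=
  pvNodupKeys_foldl _ pvUpd4 PySem.Dict.empty ys
lemma pvNodupKeys_B2 (ys : List String) : (pvB2 ys).keys.Nodup :=
  pvNodupKeys_foldl _ pvUpd3 PySem.Dict.empty ys
lemma pvNodupKeys_B1 (ys : List String) : (pvB1 ys).keys.Nodup :=
  pvNodupKeys_foldl _ pvUpd2 PySem.Dict.empty ys

-- dicts() is a deep copy: it leaves the tree unchanged
lemma pvDicts5_B5 (ys : List String) : pvDicts5 (pvB5 ys) = pvB5 ys := by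
  apply PySem.Dict.ext
  show (PySem.Dict.ofList ((pvB5 ys).items.map (fun kv => (kv.1, id kv.2)))).items = _
  rw [pvOfListMap _ id (pvNodupKeys_B5 ys)]
  simp
lemma pvDicts4_B4 (ys : List String) : pvDicts4 (pvB4 ys) = pvB4 ys := by
  apply PySem.Dict.ext
  rw [pvDicts4, pvOfListMap _ _ (pvNodupKeys_B4 ys)]
  conv_lhs => rw [pvItems_B4]
  conv_rhs => rw [pvItems_B4]
  rw [List.map_map]
  apply List.map_congr_left
  intro c _
  simp [Function.comp, pvDicts5_B5]
lemma pvDicts3_B3 (ys : List String) : pvDicts3 (pvB3 ys) = pvB3 ys := by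
  apply PySem.Dict.ext
  rw [pvDicts3, pvOfListMap _ _ (pvNodupKeys_B3 ys)]
  conv_lhs => rw [pvItems_B3]
  conv_rhs => rw [pvItems_B3]
  rw [List.map_map]
  apply List.map_congr_left
  intro c _
  simp [Function.comp, pvDicts4_B4]
lemma pvDicts2_B2 (ys : List String) : pvDicts2 (pvB2 ys) = pvB2 ys := by
  apply PySem.Dict.ext
  rw [pvDicts2, pvOfListMap _ _ (pvNodupKeys_B2 ys)]
  conv_lhs => rw [pvItems_B2]
  conv_rhs => rw [pvItems_B2]
  rw [List.map_map]
  apply List.map_congr_left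
  intro c _
  simp [Function.comp, pvDicts3_B3]
lemma pvDicts1_B1 (ys : List String) : pvDicts1 (pvB1 ys) = pvB1 ys := by
  apply PySem.Dict.ext
  rw [pvDicts1, pvOfListMap _ _ (pvNodupKeys_B1 ys)]
  conv_lhs => rw [pvItems_B1]
  conv_rhs => rw [pvItems_B1]
  rw [List.map_map]
  apply List.map_congr_left
  intro c _
  simp [Function.comp, pvDicts2_B2]

-- generic membership / nodup through a set-accumulating fold
lemma pvMemFoldl {β : Type} (body : PySem.Set String → β → PySem.Set String) (P : β → String → Prop)
    (hb : ∀ s a y, y ∈ body s a ↔ y ∈ s ∨ P a y) (l : List β) (s : PySem.Set String) (y : String) :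
    y ∈ l.foldl body s ↔ y ∈ s ∨ ∃ a ∈ l, P a y := by
  induction l generalizing s with
  | nil => simp
  | cons a t ih => rw [List.foldl_cons, ih, hb]; simp [or_assoc]

lemma pvNodupFoldl {β : Type} (body : PySem.Set String → β → PySem.Set String)
    (hb : ∀ s a, s.Nodup → (body s a).Nodup) (l : List β) (s : PySem.Set String) (h : s.Nodup) :
    (l.foldl body s).Nodup := by
  induction l generalizing s with
  | nil => exact h
  | cons a t ih => exact ih _ (hb _ _ h)

-- what each traversal level contributes, per item
def pvP4 (kv : String × pvT5) (y : String) : Prop :=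
  if kv.2.keys.length = 3 then y = kv.1 else y ∈ kv.2.keys
def pvP3 (kv : String × pvT4) (y : String) : Prop :=
  if kv.2.keys.length = 10 then y = kv.1 else ∃ a ∈ kv.2.items, pvP4 a y
def pvP2 (kv : String × pvT3) (y : String) : Prop :=
  if kv.2.keys.length = 10 then y = kv.1 else ∃ a ∈ kv.2.items, pvP3 a y
def pvP1 (kv : String × pvT2) (y : String) : Prop :=
  if kv.2.keys.length = 10 then y = kv.1 else ∃ a ∈ kv.2.items, pvP2 a y

lemma pvMemCollect (t : pvT1) (y : String) :
    y ∈ pvCollect t ↔ ∃ a ∈ t.items, pvP1 a y := by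
  have hb4 : ∀ (s : PySem.Set String) (a : String × pvT5) (y : String),
      y ∈ (if a.2.keys.length == 3 then s.add a.1 else s.update a.2.keys) ↔ y ∈ s ∨ pvP4 a y := by
    intro s a y
    by_cases h : a.2.keys.length = 3
    · simp [h, pvP4, PySem.Set.mem_add]
    · simp [h, pvP4, PySem.Set.mem_update]
  have hb3 : ∀ (s : PySem.Set String) (a : String × pvT4) (y : String),
      y ∈ (if a.2.keys.length == 10 then s.add a.1
           else a.2.items.foldl (fun s kv4 =>
             if kv4.2.keys.length == 3 then s.add kv4.1 else s.update kv4.2.keys) s) ↔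
        y ∈ s ∨ pvP3 a y := by
    intro s a y
    by_cases h : a.2.keys.length = 10
    · simp [h, pvP3, PySem.Set.mem_add]
    · have hbf : (a.2.keys.length == 10) = false := by simp [h]
      rw [hbf]
      simp only [Bool.false_eq_true, if_false]
      rw [pvMemFoldl _ pvP4 hb4]
      simp only [pvP3, if_neg h]
  have hb2 : ∀ (s : PySem.Set String) (a : String × pvT3) (y : String),
      y ∈ (if a.2.keys.length == 10 then s.add a.1
           else a.2.items.foldl (fun s kv3 =>
             if kv3.2.keys.length == 10 then s.add kv3.1
             else kv3.2.items.foldl (fun s kv4 =>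
               if kv4.2.keys.length == 3 then s.add kv4.1 else s.update kv4.2.keys) s) s) ↔
        y ∈ s ∨ pvP2 a y := by
    intro s a y
    by_cases h : a.2.keys.length = 10
    · simp [h, pvP2, PySem.Set.mem_add]
    · have hbf : (a.2.keys.length == 10) = false := by simp [h]
      rw [hbf]
      simp only [Bool.false_eq_true, if_false]
      rw [pvMemFoldl _ pvP3 hb3]
      simp only [pvP2, if_neg h]
  have hb1 : ∀ (s : PySem.Set String) (a : String × pvT2) (y : String),
      y ∈ (if a.2.keys.length == 10 then s.add a.1
           else a.2.items.foldl (fun s kv2 =>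
             if kv2.2.keys.length == 10 then s.add kv2.1
             else kv2.2.items.foldl (fun s kv3 =>
               if kv3.2.keys.length == 10 then s.add kv3.1
               else kv3.2.items.foldl (fun s kv4 =>
                 if kv4.2.keys.length == 3 then s.add kv4.1 else s.update kv4.2.keys) s) s) s) ↔
        y ∈ s ∨ pvP1 a y := by
    intro s a y
    by_cases h : a.2.keys.length = 10
    · simp [h, pvP1, PySem.Set.mem_add]
    · have hbf : (a.2.keys.length == 10) = false := by simp [h]
      rw [hbf]
      simp only [Bool.false_eq_true, if_false]
      rw [pvMemFoldl _ pvP2 hb2]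
      simp only [pvP1, if_neg h]
  unfold pvCollect
  rw [pvMemFoldl _ pvP1 hb1]
  simp [PySem.Set.empty]

lemma pvNodupCollect (t : pvT1) : (pvCollect t).Nodup := by
  unfold pvCollect
  apply pvNodupFoldl
  · intro s a h
    split
    · exact PySem.Set.nodup_add _ _ h
    · apply pvNodupFoldl _ _ _ _ h
      intro s a h
      split
      · exact PySem.Set.nodup_add _ _ h
      · apply pvNodupFoldl _ _ _ _ h
        intro s a h
        split
        · exact PySem.Set.nodup_add _ _ h
        · apply pvNodupFoldl _ _ _ _ h
          intro s a h
          split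
          · exact PySem.Set.nodup_add _ _ h
          · exact PySem.Set.nodup_update _ _ h
  · exact List.nodup_nil

-- the four level equivalences
lemma pvLvl4 (xs : List String) (y k4 x0 : String) (hx0 : x0 ∈ xs) (hk : pvG 4 x0 = k4) :
    pvP4 (k4, pvB5 (pvF 4 xs k4)) y ↔ ∃ x ∈ xs, pvG 4 x = k4 ∧ y = pvCls4 xs x := by
  have hcls : ∀ x, pvG 4 x = k4 →
      pvCls4 xs x = (if (PySem.Set.ofList (pvF 4 xs k4)).length = 3 then k4 else x) := by
    intro x hx; unfold pvCls4; rw [hx]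
  unfold pvP4
  simp only [pvKeys_B5]
  by_cases h3 : (PySem.Set.ofList (pvF 4 xs k4)).length = 3
  · rw [if_pos h3]
    constructor
    · rintro rfl; exact ⟨x0, hx0, hk, by rw [hcls x0 hk, if_pos h3]⟩
    · rintro ⟨x, _, hgx, hy⟩; rw [hy, hcls x hgx, if_pos h3]
  · rw [if_neg h3, PySem.Set.mem_ofList]
    constructor
    · intro hy
      have hm := List.mem_filter.mp hy
      have hg : pvG 4 y = k4 := by simpa using hm.2
      exact ⟨y, hm.1, hg, by rw [hcls y hg, if_neg h3]⟩
    · rintro ⟨x, hx, hgx, hy⟩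
      rw [hy, hcls x hgx, if_neg h3]
      exact List.mem_filter.mpr ⟨hx, by simp [hgx]⟩

lemma pvLvl3 (xs : List String) (y k3 x0 : String) (hx0 : x0 ∈ xs) (hk : pvG 5 x0 = k3) :
    pvP3 (k3, pvB4 (pvF 5 xs k3)) y ↔ ∃ x ∈ xs, pvG 5 x = k3 ∧ y = pvCls3 xs x := by
  have hcls : ∀ x, pvG 5 x = k3 →
      pvCls3 xs x = (if pvN 5 4 xs k3 = 10 then k3 else pvCls4 xs x) := by
    intro x hx; unfold pvCls3; rw [hx]
  unfold pvP3
  simp only [pvKeys_B4 (pvF 5 xs k3)]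
  have hlen : (PySem.Set.ofList ((pvF 5 xs k3).map (pvG 4))).length = pvN 5 4 xs k3 := rfl
  rw [hlen]
  by_cases hc : pvN 5 4 xs k3 = 10
  · rw [if_pos hc]
    constructor
    · rintro rfl; exact ⟨x0, hx0, hk, by rw [hcls x0 hk, if_pos hc]⟩
    · rintro ⟨x, _, hgx, hy⟩; rw [hy, hcls x hgx, if_pos hc]
  · rw [if_neg hc]
    rw [pvItems_B4 (pvF 5 xs k3)]
    constructor
    · rintro ⟨a, ha, hPa⟩
      obtain ⟨kd, hkd, rfl⟩ := List.mem_map.mp ha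
      have hkd' : kd ∈ (pvF 5 xs k3).map (pvG 4) := (PySem.Set.mem_ofList _ _).mp hkd
      obtain ⟨x1, hx1F, hx1g⟩ := List.mem_map.mp hkd'
      have hx1m := List.mem_filter.mp hx1F
      have hx1g' : pvG 5 x1 = k3 := by simpa using hx1m.2
      have hfl : (pvF 5 xs k3).filter (fun p => pvG 4 p == kd) = pvF 4 xs kd :=
        pvFilter_flatten 4 xs k3 kd x1 hx1g' hx1g
      rw [hfl] at hPa
      obtain ⟨x, hx, hg, hy⟩ := (pvLvl4 xs y kd x1 hx1m.1 hx1g).mp hPa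
      have hgk : pvG 5 x = k3 := by rw [← hx1g']; exact pvG_mono (by rw [hg, hx1g])
      exact ⟨x, hx, hgk, by rw [hy, hcls x hgk, if_neg hc]⟩
    · rintro ⟨x, hx, hg, hy⟩
      refine ⟨(pvG 4 x, pvB5 ((pvF 5 xs k3).filter (fun p => pvG 4 p == pvG 4 x))), ?_, ?_⟩
      · exact List.mem_map.mpr ⟨pvG 4 x, (PySem.Set.mem_ofList _ _).mpr
          (List.mem_map.mpr ⟨x, List.mem_filter.mpr ⟨hx, by simp [hg]⟩, rfl⟩), rfl⟩
      · rw [pvFilter_flatten 4 xs k3 (pvG 4 x) x hg rfl]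
        exact (pvLvl4 xs y (pvG 4 x) x hx rfl).mpr ⟨x, hx, rfl, by rw [hy, hcls x hg, if_neg hc]⟩

lemma pvLvl2 (xs : List String) (y k2 x0 : String) (hx0 : x0 ∈ xs) (hk : pvG 6 x0 = k2) :
    pvP2 (k2, pvB3 (pvF 6 xs k2)) y ↔ ∃ x ∈ xs, pvG 6 x = k2 ∧ y = pvCls2 xs x := by
  have hcls : ∀ x, pvG 6 x = k2 →
      pvCls2 xs x = (if pvN 6 5 xs k2 = 10 then k2 else pvCls3 xs x) := by
    intro x hx; unfold pvCls2; rw [hx]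
  unfold pvP2
  simp only [pvKeys_B3 (pvF 6 xs k2)]
  have hlen : (PySem.Set.ofList ((pvF 6 xs k2).map (pvG 5))).length = pvN 6 5 xs k2 := rfl
  rw [hlen]
  by_cases hc : pvN 6 5 xs k2 = 10
  · rw [if_pos hc]
    constructor
    · rintro rfl; exact ⟨x0, hx0, hk, by rw [hcls x0 hk, if_pos hc]⟩
    · rintro ⟨x, _, hgx, hy⟩; rw [hy, hcls x hgx, if_pos hc]
  · rw [if_neg hc]
    rw [pvItems_B3 (pvF 6 xs k2)]
    constructor
    · rintro ⟨a, ha, hPa⟩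
      obtain ⟨kd, hkd, rfl⟩ := List.mem_map.mp ha
      have hkd' : kd ∈ (pvF 6 xs k2).map (pvG 5) := (PySem.Set.mem_ofList _ _).mp hkd
      obtain ⟨x1, hx1F, hx1g⟩ := List.mem_map.mp hkd'
      have hx1m := List.mem_filter.mp hx1F
      have hx1g' : pvG 6 x1 = k2 := by simpa using hx1m.2
      have hfl : (pvF 6 xs k2).filter (fun p => pvG 5 p == kd) = pvF 5 xs kd :=
        pvFilter_flatten 5 xs k2 kd x1 hx1g' hx1g
      rw [hfl] at hPa
      obtain ⟨x, hx, hg, hy⟩ := (pvLvl3 xs y kd x1 hx1m.1 hx1g).mp hPa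
      have hgk : pvG 6 x = k2 := by rw [← hx1g']; exact pvG_mono (by rw [hg, hx1g])
      exact ⟨x, hx, hgk, by rw [hy, hcls x hgk, if_neg hc]⟩
    · rintro ⟨x, hx, hg, hy⟩
      refine ⟨(pvG 5 x, pvB4 ((pvF 6 xs k2).filter (fun p => pvG 5 p == pvG 5 x))), ?_, ?_⟩
      · exact List.mem_map.mpr ⟨pvG 5 x, (PySem.Set.mem_ofList _ _).mpr
          (List.mem_map.mpr ⟨x, List.mem_filter.mpr ⟨hx, by simp [hg]⟩, rfl⟩), rfl⟩
      · rw [pvFilter_flatten 5 xs k2 (pvG 5 x) x hg rfl]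
        exact (pvLvl3 xs y (pvG 5 x) x hx rfl).mpr ⟨x, hx, rfl, by rw [hy, hcls x hg, if_neg hc]⟩

lemma pvLvl1 (xs : List String) (y k1 x0 : String) (hx0 : x0 ∈ xs) (hk : pvG 7 x0 = k1) :
    pvP1 (k1, pvB2 (pvF 7 xs k1)) y ↔ ∃ x ∈ xs, pvG 7 x = k1 ∧ y = pvCls1 xs x := by
  have hcls : ∀ x, pvG 7 x = k1 →
      pvCls1 xs x = (if pvN 7 6 xs k1 = 10 then k1 else pvCls2 xs x) := by
    intro x hx; unfold pvCls1; rw [hx]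
  unfold pvP1
  simp only [pvKeys_B2 (pvF 7 xs k1)]
  have hlen : (PySem.Set.ofList ((pvF 7 xs k1).map (pvG 6))).length = pvN 7 6 xs k1 := rfl
  rw [hlen]
  by_cases hc : pvN 7 6 xs k1 = 10
  · rw [if_pos hc]
    constructor
    · rintro rfl; exact ⟨x0, hx0, hk, by rw [hcls x0 hk, if_pos hc]⟩
    · rintro ⟨x, _, hgx, hy⟩; rw [hy, hcls x hgx, if_pos hc]
  · rw [if_neg hc]
    rw [pvItems_B2 (pvF 7 xs k1)]
    constructor
    · rintro ⟨a, ha, hPa⟩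
      obtain ⟨kd, hkd, rfl⟩ := List.mem_map.mp ha
      have hkd' : kd ∈ (pvF 7 xs k1).map (pvG 6) := (PySem.Set.mem_ofList _ _).mp hkd
      obtain ⟨x1, hx1F, hx1g⟩ := List.mem_map.mp hkd'
      have hx1m := List.mem_filter.mp hx1F
      have hx1g' : pvG 7 x1 = k1 := by simpa using hx1m.2
      have hfl : (pvF 7 xs k1).filter (fun p => pvG 6 p == kd) = pvF 6 xs kd :=
        pvFilter_flatten 6 xs k1 kd x1 hx1g' hx1g
      rw [hfl] at hPa
      obtain ⟨x, hx, hg, hy⟩ := (pvLvl2 xs y kd x1 hx1m.1 hx1g).mp hPa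
      have hgk : pvG 7 x = k1 := by rw [← hx1g']; exact pvG_mono (by rw [hg, hx1g])
      exact ⟨x, hx, hgk, by rw [hy, hcls x hgk, if_neg hc]⟩
    · rintro ⟨x, hx, hg, hy⟩
      refine ⟨(pvG 6 x, pvB3 ((pvF 7 xs k1).filter (fun p => pvG 6 p == pvG 6 x))), ?_, ?_⟩
      · exact List.mem_map.mpr ⟨pvG 6 x, (PySem.Set.mem_ofList _ _).mpr
          (List.mem_map.mpr ⟨x, List.mem_filter.mpr ⟨hx, by simp [hg]⟩, rfl⟩), rfl⟩
      · rw [pvFilter_flatten 6 xs k1 (pvG 6 x) x hg rfl]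
        exact (pvLvl2 xs y (pvG 6 x) x hx rfl).mpr ⟨x, hx, rfl, by rw [hy, hcls x hg, if_neg hc]⟩

-- A's collected set has exactly the per-pattern classifications as members
lemma pvMemCollectTree (xs : List String) (y : String) :
    y ∈ pvCollect (pvB1 xs) ↔ ∃ x ∈ xs, y = pvCls1 xs x := by
  rw [pvMemCollect, pvItems_B1 xs]
  constructor
  · rintro ⟨a, ha, hPa⟩
    obtain ⟨k1, hk1, rfl⟩ := List.mem_map.mp ha
    have hk1' : k1 ∈ xs.map (pvG 7) := (PySem.Set.mem_ofList _ _).mp hk1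
    obtain ⟨x1, hx1, hx1g⟩ := List.mem_map.mp hk1'
    have hPa' : pvP1 (k1, pvB2 (pvF 7 xs k1)) y := hPa
    obtain ⟨x, hx, _, hy⟩ := (pvLvl1 xs y k1 x1 hx1 hx1g).mp hPa'
    exact ⟨x, hx, hy⟩
  · rintro ⟨x, hx, hy⟩
    refine ⟨(pvG 7 x, pvB2 (xs.filter (fun p => pvG 7 p == pvG 7 x))), ?_, ?_⟩
    · exact List.mem_map.mpr ⟨pvG 7 x, (PySem.Set.mem_ofList _ _).mpr
        (List.mem_map.mpr ⟨x, hx, rfl⟩), rfl⟩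
    · exact (pvLvl1 xs y (pvG 7 x) x hx rfl).mpr ⟨x, hx, rfl, hy⟩

-- lookups in B's children dicts
lemma pvC1_getD (xs : List String) (k : String) :
    (pvChild (-7) (-6) xs).getD k PySem.Set.empty
      = PySem.Set.ofList ((xs.filter (fun p => pvG 7 p == k)).map (pvG 6)) := by
  have h0 : (pvChild (-7) (-6) xs).getD k PySem.Set.empty
      = (xs.foldl (fun d x => d.insert (PySem.Str.slice x none (some (-7)))
          ((fun (s : PySem.Set String) (x : String) => s.add (PySem.Str.slice x none (some (-6))))
            (d.getD (PySem.Str.slice x none (some (-7))) PySem.Set.empty) x)) PySem.Dict.empty).getD k PySem.Set.empty := rfl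
  have h := pvGetD_foldl (fun p => PySem.Str.slice p none (some (-7)))
    (fun s x => s.add (PySem.Str.slice x none (some (-6)))) PySem.Set.empty xs PySem.Dict.empty k
  rw [h0, h, PySem.Dict.getD_empty, ← PySem.Set.update_map_eq_foldl_add, PySem.Set.update_empty]
  simp only [pvSlice7, pvSlice6]

lemma pvC2_getD (xs : List String) (k : String) :
    (pvChild (-6) (-5) xs).getD k PySem.Set.empty
      = PySem.Set.ofList ((xs.filter (fun p => pvG 6 p == k)).map (pvG 5)) := by
  have h0 : (pvChild (-6) (-5) xs).getD k PySem.Set.empty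
      = (xs.foldl (fun d x => d.insert (PySem.Str.slice x none (some (-6)))
          ((fun (s : PySem.Set String) (x : String) => s.add (PySem.Str.slice x none (some (-5))))
            (d.getD (PySem.Str.slice x none (some (-6))) PySem.Set.empty) x)) PySem.Dict.empty).getD k PySem.Set.empty := rfl
  have h := pvGetD_foldl (fun p => PySem.Str.slice p none (some (-6)))
    (fun s x => s.add (PySem.Str.slice x none (some (-5)))) PySem.Set.empty xs PySem.Dict.empty k
  rw [h0, h, PySem.Dict.getD_empty, ← PySem.Set.update_map_eq_foldl_add, PySem.Set.update_empty]
  simp only [pvSlice6, pvSlice5]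

lemma pvC3_getD (xs : List String) (k : String) :
    (pvChild (-5) (-4) xs).getD k PySem.Set.empty
      = PySem.Set.ofList ((xs.filter (fun p => pvG 5 p == k)).map (pvG 4)) := by
  have h0 : (pvChild (-5) (-4) xs).getD k PySem.Set.empty
      = (xs.foldl (fun d x => d.insert (PySem.Str.slice x none (some (-5)))
          ((fun (s : PySem.Set String) (x : String) => s.add (PySem.Str.slice x none (some (-4))))
            (d.getD (PySem.Str.slice x none (some (-5))) PySem.Set.empty) x)) PySem.Dict.empty).getD k PySem.Set.empty := rfl
  have h := pvGetD_foldl (fun p => PySem.Str.slice p none (some (-5)))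
    (fun s x => s.add (PySem.Str.slice x none (some (-4)))) PySem.Set.empty xs PySem.Dict.empty k
  rw [h0, h, PySem.Dict.getD_empty, ← PySem.Set.update_map_eq_foldl_add, PySem.Set.update_empty]
  simp only [pvSlice5, pvSlice4]

lemma pvC4_getD (xs : List String) (k : String) :
    ((xs.foldl (fun d p =>
        d.modify (PySem.Str.slice p none (some (-4))) PySem.Set.empty (fun s => s.add p)) PySem.Dict.empty).getD
      k PySem.Set.empty)
      = PySem.Set.ofList (xs.filter (fun p => pvG 4 p == k)) := by
  have h0 : ((xs.foldl (fun d p =>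
        d.modify (PySem.Str.slice p none (some (-4))) PySem.Set.empty (fun s => s.add p)) PySem.Dict.empty).getD
      k PySem.Set.empty)
      = (xs.foldl (fun d x => d.insert (PySem.Str.slice x none (some (-4)))
          ((fun (s : PySem.Set String) (x : String) => s.add x)
            (d.getD (PySem.Str.slice x none (some (-4))) PySem.Set.empty) x)) PySem.Dict.empty).getD k PySem.Set.empty := rfl
  have h := pvGetD_foldl (fun p => PySem.Str.slice p none (some (-4)))
    (fun s x => s.add x) PySem.Set.empty xs PySem.Dict.empty k
  rw [h0, h, PySem.Dict.getD_empty]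
  show List.foldl PySem.Set.add [] (xs.filter (fun x => PySem.Str.slice x none (some (-4)) == k)) = _
  rw [← PySem.Set.ofList_eq_foldl]
  simp only [pvSlice4]

-- B's prefix set is literally the classification of each pattern, deduplicated
lemma pvAlt_prefixes (xs : List String) :
    (xs.foldl (fun s p =>
      if ((pvChild (-7) (-6) xs).getD (PySem.Str.slice p none (some (-7))) PySem.Set.empty).length == 10 then
        s.add (PySem.Str.slice p none (some (-7)))
      else if ((pvChild (-6) (-5) xs).getD (PySem.Str.slice p none (some (-6))) PySem.Set.empty).length == 10 then
        s.add (PySem.Str.slice p none (some (-6)))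
      else if ((pvChild (-5) (-4) xs).getD (PySem.Str.slice p none (some (-5))) PySem.Set.empty).length == 10 then
        s.add (PySem.Str.slice p none (some (-5)))
      else if ((xs.foldl (fun d p =>
          d.modify (PySem.Str.slice p none (some (-4))) PySem.Set.empty (fun s => s.add p)) PySem.Dict.empty).getD
            (PySem.Str.slice p none (some (-4))) PySem.Set.empty).length == 3 then
        s.add (PySem.Str.slice p none (some (-4)))
      else s.add p) PySem.Set.empty)
    = PySem.Set.ofList (xs.map (pvCls1 xs)) := by
  have hbody : (fun (s : PySem.Set String) p =>
      if ((pvChild (-7) (-6) xs).getD (PySem.Str.slice p none (some (-7))) PySem.Set.empty).length == 10 then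
        s.add (PySem.Str.slice p none (some (-7)))
      else if ((pvChild (-6) (-5) xs).getD (PySem.Str.slice p none (some (-6))) PySem.Set.empty).length == 10 then
        s.add (PySem.Str.slice p none (some (-6)))
      else if ((pvChild (-5) (-4) xs).getD (PySem.Str.slice p none (some (-5))) PySem.Set.empty).length == 10 then
        s.add (PySem.Str.slice p none (some (-5)))
      else if ((xs.foldl (fun d p =>
          d.modify (PySem.Str.slice p none (some (-4))) PySem.Set.empty (fun s => s.add p)) PySem.Dict.empty).getD
            (PySem.Str.slice p none (some (-4))) PySem.Set.empty).length == 3 then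
        s.add (PySem.Str.slice p none (some (-4)))
      else s.add p)
      = fun s p => s.add (pvCls1 xs p) := by
    funext s p
    rw [pvC1_getD, pvC2_getD, pvC3_getD, pvC4_getD]
    simp only [pvSlice7, pvSlice6, pvSlice5, pvSlice4]
    unfold pvCls1 pvCls2 pvCls3 pvCls4 pvN pvF
    simp only [beq_iff_eq, apply_ite (PySem.Set.add s)]
  rw [hbody, ← PySem.Set.update_map_eq_foldl_add xs (pvCls1 xs) PySem.Set.empty,
    PySem.Set.update_empty]

-- ===== VERDICT (by name: the statement is the Claim_ definition above) =====
theorem reduce_bursts_to_cmr_patterns_spec : Claim_equal_reduce_bursts_to_cmr_patterns := by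
  intro xs _
  unfold Spec_reduce_bursts_to_cmr_patterns
  show reduce_bursts_to_cmr_patterns xs = reduce_bursts_to_cmr_patterns_alt xs
  simp only [reduce_bursts_to_cmr_patterns, reduce_bursts_to_cmr_patterns_alt]
  rw [pvAlt_prefixes xs]
  rw [show xs.foldl pvTreeInsert PySem.Dict.empty = pvB1 xs from rfl, pvDicts1_B1]
  have hperm : (pvCollect (pvB1 xs)).Perm (PySem.Set.ofList (xs.map (pvCls1 xs))) := by
    rw [List.perm_ext_iff_of_nodup (pvNodupCollect _) (PySem.Set.nodup_ofList _)]
    intro y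
    rw [pvMemCollectTree, PySem.Set.mem_ofList, List.mem_map]
    constructor
    · rintro ⟨x, hx, hy⟩; exact ⟨x, hx, hy.symm⟩
    · rintro ⟨x, hx, hy⟩; exact ⟨x, hx, hy.symm⟩
  rw [PySem.List.sorted_eq_sorted_of_perm _ _ (fun q => q) (fun a b h => h) hperm]
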